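-- pv_equiv track=rewrite | github.com/mpoprawa/Algorithms | Select/DualSelect.py | dualSelect
-- ===== SOURCE A (Python) =====
-- def sort(arr):
--     comp=0
--     for j in range(1,len(arr)):
--         key=arr[j]
--         i=j-1
--         comp+=1
--         while (arr[i]>key):
--             arr[i+1]=arr[i]
--             i=i-1
--             if (i<0):
--                 break
--             comp+=1
--         arr[i+1]=key
--     return comp
--
-- def findMedians(arr, l, r):
--     L = []
--     for i in range(l, r):
--         L.append(arr[i])
--     c=sort(L)
--     return L[(r-l)//3],L[2*(r-l)//3],c
--
-- def findMedian(arr, l, r):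
--     L = []
--     for i in range(l, r):
--         L.append(arr[i])
--     c=sort(L)
--     return L[(r-l)//2],c
--
-- def select(arr, l, r):
--     n = r - l + 1
--     median = []
--     i = 0
--     c=0
--     while i < n//5:
--         m,c1=findMedian(arr, l+5*i, l+5*i+5)
--         median.append(m)
--         c+=c1
--         i += 1
--     if i*5 < n:
--         m,c1=findMedian(arr, l+5*i, l+5*i+(n%5))
--         median.append(m)
--         c+=c1
--         i += 1
--     if i == 1:
--         medOfmed = median[i-1]
--     else:
--         medOfmed,c1 = select(median, 0, i-1)
--         c+=c1
--     return medOfmed,c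
--
-- def dualSelect(arr, l, r):
--     n = r - l + 1
--     median1 = []
--     median2 = []
--     i = 0
--     c=0
--     while i < n//5:
--         m1,m2,c1=findMedians(arr, l+5*i, l+5*i+5)
--         median1.append(m1)
--         median2.append(m2)
--         c+=c1
--         i += 1
--     if i*5 < n:
--         m1,m2,c1=findMedians(arr, l+5*i, l+5*i+(n%5))
--         median1.append(m1)
--         median2.append(m2)
--         c+=c1
--         i += 1
--     if i == 1:
--         med1 = median1[0]
--         med2 = median2[0]
--     else:
--         med1,c1 = select(median1, 0, i-1)
--         med2,c2 = select(median2, 0, i-1)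
--         c+=c1+c2
--     return med1,med2,c
-- ===== SOURCE B (Python) =====
-- def insertCount(key, rxs):
--     # Insert key into the descending-sorted list rxs, counting the
--     # comparisons made (one per element inspected).
--     if not rxs:
--         return [key], 0
--     if rxs[0] > key:
--         rest, c = insertCount(key, rxs[1:])
--         return [rxs[0]] + rest, c + 1
--     return [key] + rxs, 1
--
-- def sortCount(xs):
--     # Insertion sort returning (sorted ascending, number of comparisons).
--     rxs, c = [], 0
--     for x in xs:
--         rxs, c1 = insertCount(x, rxs)
--         c += c1
--     return rxs[::-1], c
--
-- def groupMedians(xs):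
--     # Median of each consecutive group of five (last group may be short).
--     if not xs:
--         return [], 0
--     g, c = sortCount(xs[:5])
--     ms, c2 = groupMedians(xs[5:])
--     return [g[len(g) // 2]] + ms, c + c2
--
-- def groupMedians2(xs):
--     # Lower-third and upper-third element of each group of five.
--     if not xs:
--         return [], [], 0
--     g, c = sortCount(xs[:5])
--     m1, m2, c2 = groupMedians2(xs[5:])
--     k = len(g)
--     return [g[k // 3]] + m1, [g[2 * k // 3]] + m2, c + c2
--
-- def medianReduce(xs):
--     # Repeatedly replace the list by its group-of-five medians.
--     c = 0
--     while len(xs) > 1: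
--         xs, c1 = groupMedians(xs)
--         c += c1
--     return xs[0], c
--
-- def dualSelect(arr, l, r):
--     seg = [arr[i] for i in range(l, r + 1)]
--     med1, med2, c = groupMedians2(seg)
--     if len(med1) == 1:
--         return med1[0], med2[0], c
--     a, c1 = medianReduce(med1)
--     b, c2 = medianReduce(med2)
--     return a, b, c + c1 + c2
-- ===== Notes on version B (the rewrite author's own statement) =====
-- stated objective: alternative
-- what changed: B replaces A's in-place index-shifting insertion sort with a functional recursive insert that counts each comparison as it happens, replaces A's index-arithmetic grouping loops with recursive slicing into groups of five, and replaces the recursive `select` with an iterative reduce-until-one-median loop; Pre_ excludes only inputs on which A raises (an index outside the list's Python index range, or r < l, where A's select recurses forever).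
import Mathlib
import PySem

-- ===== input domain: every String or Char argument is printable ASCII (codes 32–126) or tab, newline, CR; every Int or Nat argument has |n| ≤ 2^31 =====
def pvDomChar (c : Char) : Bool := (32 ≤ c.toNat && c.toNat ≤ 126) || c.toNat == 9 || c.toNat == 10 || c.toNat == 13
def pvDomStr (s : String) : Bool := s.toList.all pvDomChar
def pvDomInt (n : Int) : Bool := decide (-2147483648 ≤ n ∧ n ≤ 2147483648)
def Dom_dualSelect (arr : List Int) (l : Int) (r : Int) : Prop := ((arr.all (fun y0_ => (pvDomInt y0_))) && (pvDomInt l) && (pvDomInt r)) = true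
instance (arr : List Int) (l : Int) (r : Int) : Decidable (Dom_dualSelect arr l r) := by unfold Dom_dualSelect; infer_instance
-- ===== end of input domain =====

-- B re-implements the statistic with a functional insertion sort (recursive
-- insert, counting each comparison as it happens), recursive group-of-five
-- chunking, and an iterative reduction loop replacing the recursive `select`;
-- objective: alternative decomposition, same exact return value (A mutates
-- only local copies, so return-value equivalence is full equivalence).

-- ===== PORT A =====
-- Python `sort` (in-place insertion sort counting comparisons). The inner
-- while-loop index i is carried as a Nat; Python's i = -1 break state is
-- returned explicitly as the Int component. Otherwise step for step.
def sortInnerA (arr : List Int) (key : Int) : Nat → Int → List Int × Int × Int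
  | i, comp =>
    if PySem.List.pyGetD arr (i : Int) 0 > key then
      let arr' := arr.set (i + 1) (PySem.List.pyGetD arr (i : Int) 0)
      match i with
      | 0 => (arr', -1, comp)          -- i becomes -1: `break`
      | i' + 1 => sortInnerA arr' key i' (comp + 1)
    else (arr, (i : Int), comp)

-- length is preserved (cited by sortOuterA's termination proof)
theorem sortInnerA_length (key : Int) :
    ∀ (i : Nat) (arr : List Int) (comp : Int),
      (sortInnerA arr key i comp).1.length = arr.length := by
  intro i
  induction i with
  | zero =>
    intro arr comp
    rw [sortInnerA]
    split <;> simp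
  | succ i' ih =>
    intro arr comp
    rw [sortInnerA]
    split <;> simp [ih]

def sortOuterA (arr : List Int) (comp : Int) (j : Nat) : List Int × Int :=
  if h : j < arr.length then
    let key := PySem.List.pyGetD arr (j : Int) 0
    let res := sortInnerA arr key (j - 1) (comp + 1)
    sortOuterA (res.1.set (res.2.1 + 1).toNat key) res.2.2 (j + 1)
  else (arr, comp)
termination_by arr.length - j
decreasing_by simp [sortInnerA_length]; omega

def sortA (arr : List Int) : List Int × Int := sortOuterA arr 0 1

def findMediansA (arr : List Int) (l r : Int) : Int × Int × Int :=
  let L := (PySem.List.pyRange l r 1).foldl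
    (fun acc i => acc ++ [PySem.List.pyGetD arr i 0]) ([] : List Int)
  let sc := sortA L
  (PySem.List.pyGetD sc.1 (PySem.Int.floordiv (r - l) 3) 0,
   PySem.List.pyGetD sc.1 (PySem.Int.floordiv (2 * (r - l)) 3) 0, sc.2)

def findMedianA (arr : List Int) (l r : Int) : Int × Int :=
  let L := (PySem.List.pyRange l r 1).foldl
    (fun acc i => acc ++ [PySem.List.pyGetD arr i 0]) ([] : List Int)
  let sc := sortA L
  (PySem.List.pyGetD sc.1 (PySem.Int.floordiv (r - l) 2) 0, sc.2)

-- Python `select`. The while loop carries (median, c, i) as one state.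
-- The branch guard `h` only makes the recursion total: whenever the Python
-- recursion returns at all it holds (it fails only where Python recurses
-- forever, e.g. n ≤ 0; such inputs are outside Pre_).
def selectA (arr : List Int) (l r : Int) : Int × Int :=
  let n := r - l + 1
  let s := (PySem.List.pyRange 0 (PySem.Int.floordiv n 5) 1).foldl
    (fun (acc : List Int × Int × Int) i =>
      let mc := findMedianA arr (l + 5 * i) (l + 5 * i + 5)
      (acc.1 ++ [mc.1], acc.2.1 + mc.2, acc.2.2 + 1)) ([], 0, 0)
  let s2 := if s.2.2 * 5 < n then
      let mc := findMedianA arr (l + 5 * s.2.2) (l + 5 * s.2.2 + PySem.Int.mod n 5)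
      (s.1 ++ [mc.1], s.2.1 + mc.2, s.2.2 + 1)
    else s
  if s2.2.2 = 1 then (PySem.List.pyGetD s2.1 (s2.2.2 - 1) 0, s2.2.1)
  else if h : 0 ≤ s2.2.2 - 1 ∧ (s2.2.2 - 1 - 0).toNat < (r - l).toNat then
    let sub := selectA s2.1 0 (s2.2.2 - 1)
    (sub.1, s2.2.1 + sub.2)
  else (0, s2.2.1)
termination_by (r - l).toNat
decreasing_by exact h.2

def dualSelect (arr : List Int) (l : Int) (r : Int) : Int × Int × Int :=
  let n := r - l + 1
  let s := (PySem.List.pyRange 0 (PySem.Int.floordiv n 5) 1).foldl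
    (fun (acc : List Int × List Int × Int × Int) i =>
      let mc := findMediansA arr (l + 5 * i) (l + 5 * i + 5)
      (acc.1 ++ [mc.1], acc.2.1 ++ [mc.2.1], acc.2.2.1 + mc.2.2, acc.2.2.2 + 1))
    ([], [], 0, 0)
  let s2 := if s.2.2.2 * 5 < n then
      let mc := findMediansA arr (l + 5 * s.2.2.2) (l + 5 * s.2.2.2 + PySem.Int.mod n 5)
      (s.1 ++ [mc.1], s.2.1 ++ [mc.2.1], s.2.2.1 + mc.2.2, s.2.2.2 + 1)
    else s
  if s2.2.2.2 = 1 then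
    (PySem.List.pyGetD s2.1 0 0, PySem.List.pyGetD s2.2.1 0 0, s2.2.2.1)
  else
    let a1 := selectA s2.1 0 (s2.2.2.2 - 1)
    let a2 := selectA s2.2.1 0 (s2.2.2.2 - 1)
    (a1.1, a2.1, s2.2.2.1 + (a1.2 + a2.2))

-- ===== PORT B =====
-- Source B `insertCount`: insert key into the descending-sorted list, counting
-- one comparison per element inspected.
def insertCountB (key : Int) : List Int → List Int × Int
  | [] => ([key], 0)
  | x :: t =>
    if x > key then
      let r := insertCountB key t
      (x :: r.1, r.2 + 1)
    else (key :: x :: t, 1)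

-- Source B `sortCount`
def sortCountB (xs : List Int) : List Int × Int :=
  let s := xs.foldl (fun (acc : List Int × Int) x =>
      let r := insertCountB x acc.1
      (r.1, acc.2 + r.2)) ([], 0)
  (s.1.reverse, s.2)

-- Source B `groupMedians` (xs[:5] / xs[5:] are take 5 / drop 5: nonneg bounds;
-- the indices len//2, k//3, 2k//3 are nonneg Nat divisions, exact for `//`)
def groupMedB : List Int → List Int × Int
  | [] => ([], 0)
  | x :: t =>
    let g := sortCountB ((x :: t).take 5)
    let ms := groupMedB ((x :: t).drop 5)
    (g.1.getD (g.1.length / 2) 0 :: ms.1, g.2 + ms.2)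
termination_by xs => xs.length
decreasing_by simp

-- Source B `groupMedians2`
def groupMed2B : List Int → List Int × List Int × Int
  | [] => ([], [], 0)
  | x :: t =>
    let g := sortCountB ((x :: t).take 5)
    let p := groupMed2B ((x :: t).drop 5)
    let k := g.1.length
    (g.1.getD (k / 3) 0 :: p.1, g.1.getD (2 * k / 3) 0 :: p.2.1, g.2 + p.2.2)
termination_by xs => xs.length
decreasing_by simp

-- number of group-of-five medians (cited by medianReduceLoopB's termination)
theorem groupMedB_length : ∀ xs : List Int, (groupMedB xs).1.length = (xs.length + 4) / 5
  | [] => by rw [groupMedB]; simp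
  | x :: t => by
    rw [groupMedB]
    have := groupMedB_length ((x :: t).drop 5)
    simp_all
    omega
termination_by xs => xs.length
decreasing_by simp

-- Source B `medianReduce`: the while loop, state = (working list, accumulated c)
def medianReduceLoopB (xs : List Int) (c : Int) : Int × Int :=
  if _h : 1 < xs.length then
    let p := groupMedB xs
    medianReduceLoopB p.1 (c + p.2)
  else (xs.getD 0 0, c)
termination_by xs.length
decreasing_by simp [groupMedB_length]; omega

def medianReduceB (xs : List Int) : Int × Int := medianReduceLoopB xs 0

def dualSelect_alt (arr : List Int) (l : Int) (r : Int) : Int × Int × Int :=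
  let seg := (PySem.List.pyRange l (r + 1) 1).map (fun i => PySem.List.pyGetD arr i 0)
  let t := groupMed2B seg
  if t.1.length = 1 then (t.1.getD 0 0, t.2.1.getD 0 0, t.2.2)
  else
    let p := medianReduceB t.1
    let q := medianReduceB t.2.1
    (p.1, q.1, t.2.2 + p.2 + q.2)

-- ===== PRECONDITION & SPEC =====
-- Pre_ = exactly the inputs on which the Python A returns: every index read
-- lies in [l, r], which must be a valid (possibly negative, Python-style)
-- index range, and l ≤ r (for r < l A's `select` recurses forever).
def Pre_dualSelect (arr : List Int) (l : Int) (r : Int) : Prop :=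
  -(arr.length : Int) ≤ l ∧ l ≤ r ∧ r < (arr.length : Int)
instance (arr : List Int) (l : Int) (r : Int) : Decidable (Pre_dualSelect arr l r) := by
  unfold Pre_dualSelect; infer_instance

def pvWitness_dualSelect : List Int × Int × Int := ([3, 1, 2], 0, 2)

def Spec_dualSelect (arr : List Int) (l : Int) (r : Int) (out : Int × Int × Int) : Prop := out = dualSelect_alt arr l r
instance (arr : List Int) (l : Int) (r : Int) (out : Int × Int × Int) : Decidable (Spec_dualSelect arr l r out) := by unfold Spec_dualSelect; infer_instance

-- ===== CLAIM (what is proved, stated in full; the proofs are below) =====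
def Claim_equal_dualSelect : Prop := ∀ (arr : List Int) (l : Int) (r : Int), Dom_dualSelect arr l r → Pre_dualSelect arr l r → Spec_dualSelect arr l r (dualSelect arr l r)

-- ===== LEMMAS AND PROOFS =====

theorem insertCountB_length (key : Int) : ∀ rxs : List Int,
    (insertCountB key rxs).1.length = rxs.length + 1 := by
  intro rxs
  induction rxs with
  | nil => simp [insertCountB]
  | cons x t ih => rw [insertCountB]; split <;> simp [ih]

-- A's inner while loop, on array = prefix (Q ++ [p]) followed by T
-- (T.head is the slot being inserted), is B's `insertCount` on the reversed
-- prefix: same final array after the trailing write, comparison count off by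
-- the one the caller pre-added.
theorem innerGen : ∀ (Q : List Int) (p t0 : Int) (ts : List Int) (key comp : Int),
    (sortInnerA (Q ++ p :: t0 :: ts) key Q.length comp).1.set
        ((sortInnerA (Q ++ p :: t0 :: ts) key Q.length comp).2.1 + 1).toNat key
      = (insertCountB key (p :: Q.reverse)).1.reverse ++ ts
    ∧ (sortInnerA (Q ++ p :: t0 :: ts) key Q.length comp).2.2
      = comp + (insertCountB key (p :: Q.reverse)).2 - 1 := by
  intro Q
  induction Q using List.reverseRecOn with
  | nil =>
    intro p t0 ts key comp
    simp only [List.nil_append, List.length_nil]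
    rw [sortInnerA]
    by_cases hp : p > key
    · have : PySem.List.pyGetD (p :: t0 :: ts) ((0 : Nat) : Int) 0 > key := by
        simpa using hp
      simp only [this, if_pos]
      rw [insertCountB]
      simp [insertCountB, hp, List.set]
    · have : ¬ PySem.List.pyGetD (p :: t0 :: ts) ((0 : Nat) : Int) 0 > key := by
        simpa using hp
      simp only [this, if_neg, not_false_iff]
      rw [insertCountB]
      simp [hp, List.set]
  | append_singleton Q' q ih =>
    intro p t0 ts key comp
    have hassoc : (Q' ++ [q]) ++ p :: t0 :: ts = Q' ++ q :: p :: t0 :: ts := by simp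
    have hlen : (Q' ++ [q]).length = Q'.length + 1 := by simp
    rw [hassoc, hlen, sortInnerA]
    have hget : PySem.List.pyGetD (Q' ++ q :: p :: t0 :: ts) ((Q'.length + 1 : Nat) : Int) 0 = p := by
      rw [PySem.List.pyGetD_natCast]
      simp [List.getD]
    by_cases hp : p > key
    · rw [if_pos (by rw [hget]; exact hp)]
      have hset : (Q' ++ q :: p :: t0 :: ts).set (Q'.length + 1 + 1)
            (PySem.List.pyGetD (Q' ++ q :: p :: t0 :: ts) ((Q'.length + 1 : Nat) : Int) 0)
          = Q' ++ q :: p :: p :: ts := by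
        rw [hget]
        have : Q'.length + 1 + 1 = Q'.length + 2 := rfl
        simp [this, List.set]
      simp only [hset]
      have hins : insertCountB key (p :: (Q' ++ [q]).reverse)
          = (p :: (insertCountB key (q :: Q'.reverse)).1,
             (insertCountB key (q :: Q'.reverse)).2 + 1) := by
        rw [insertCountB]
        simp [hp]
      obtain ⟨h1, h2⟩ := ih q p (p :: ts) key (comp + 1)
      constructor
      · rw [hins]; simpa using h1
      · rw [hins]; simp only [h2]; ring
    · rw [if_neg (by rw [hget]; exact hp)]
      have hins : insertCountB key (p :: (Q' ++ [q]).reverse)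
          = (key :: p :: (Q' ++ [q]).reverse, 1) := by
        rw [insertCountB]
        simp [hp]
      rw [hins]
      constructor
      · have : ((Q'.length + 1 : Nat) : Int) + 1 = ((Q'.length + 2 : Nat) : Int) := by push_cast; ring
        rw [this, Int.toNat_natCast]
        simp [List.set]
      · simp

-- A's outer loop from a nonempty already-processed prefix P is B's fold
theorem outerGen : ∀ (T P : List Int), P ≠ [] → ∀ comp : Int,
    sortOuterA (P ++ T) comp P.length
      = (((T.foldl (fun (acc : List Int × Int) x =>
            let r := insertCountB x acc.1
            (r.1, acc.2 + r.2)) (P.reverse, comp)).1).reverse,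
         (T.foldl (fun (acc : List Int × Int) x =>
            let r := insertCountB x acc.1
            (r.1, acc.2 + r.2)) (P.reverse, comp)).2) := by
  intro T
  induction T with
  | nil =>
    intro P hP comp
    rw [sortOuterA]
    simp
  | cons x T' ih =>
    intro P hP comp
    cases P using List.reverseRecOn with
    | nil => exact absurd rfl hP
    | append_singleton Q p =>
      rw [sortOuterA]
      rw [dif_pos (by simp : (Q ++ [p]).length < ((Q ++ [p]) ++ x :: T').length)]
      simp only []
      have hassoc : (Q ++ [p]) ++ x :: T' = Q ++ p :: x :: T' := by simp
      have hlen : (Q ++ [p]).length = Q.length + 1 := by simp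
      have hget : PySem.List.pyGetD ((Q ++ [p]) ++ x :: T') (((Q ++ [p]).length : Nat) : Int) 0 = x := by
        rw [PySem.List.pyGetD_natCast, hassoc, hlen]
        simp [List.getD]
      rw [hget, hassoc, hlen, Nat.add_sub_cancel]
      obtain ⟨h1, h2⟩ := innerGen Q p x T' x (comp + 1)
      rw [h1, h2]
      have hlen1 : ((insertCountB x (p :: Q.reverse)).1.reverse).length = Q.length + 1 + 1 := by
        simp [insertCountB_length]
      have hne1 : (insertCountB x (p :: Q.reverse)).1.reverse ≠ [] := by
        intro hc
        have := congrArg List.length hc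
        simp [hlen1] at this
      have := ih ((insertCountB x (p :: Q.reverse)).1.reverse) hne1
        (comp + 1 + (insertCountB x (p :: Q.reverse)).2 - 1)
      rw [hlen1] at this
      rw [this]
      simp only [List.foldl_cons, List.reverse_append, List.reverse_singleton,
        List.reverse_reverse, List.singleton_append]
      have harith : comp + 1 + (insertCountB x (p :: Q.reverse)).2 - 1
          = comp + (insertCountB x (p :: Q.reverse)).2 := by ring
      rw [harith]

theorem sortA_eq (L : List Int) : sortA L = sortCountB L := by
  cases L with
  | nil => rw [sortA, sortOuterA]; simp [sortCountB]
  | cons x t =>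
    have h := outerGen t [x] (by simp) 0
    rw [sortA]
    simpa [sortCountB, insertCountB] using h

theorem sortCountB_length (xs : List Int) : (sortCountB xs).1.length = xs.length := by
  have aux : ∀ (t acc : List Int) (c : Int),
      ((t.foldl (fun (acc : List Int × Int) x =>
          let r := insertCountB x acc.1
          (r.1, acc.2 + r.2)) (acc, c)).1).length = acc.length + t.length := by
    intro t
    induction t with
    | nil => simp
    | cons x t ih =>
      intro acc c
      simp only [List.foldl_cons]
      rw [ih]
      simp [insertCountB_length]
      omega
  rw [sortCountB]
  simp [aux]

-- the values A's index loops read: arr[a], …, arr[b-1]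
def chunkVals (arr : List Int) (a b : Int) : List Int :=
  (PySem.List.pyRange a b 1).map (fun i => PySem.List.pyGetD arr i 0)

theorem chunkVals_length (arr : List Int) (a : Int) (k : Nat) :
    (chunkVals arr a (a + ↑k)).length = k := by
  simp [chunkVals, PySem.List.length_pyRange_one]

theorem findMediansA_eq (arr : List Int) (a : Int) (k : Nat) :
    findMediansA arr a (a + ↑k)
      = ((sortCountB (chunkVals arr a (a + ↑k))).1.getD (k / 3) 0,
         (sortCountB (chunkVals arr a (a + ↑k))).1.getD (2 * k / 3) 0,
         (sortCountB (chunkVals arr a (a + ↑k))).2) := by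
  rw [findMediansA]
  simp only [PySem.List.foldl_append_singleton_eq_map, List.nil_append]
  rw [sortA_eq, show a + (k : Int) - a = (k : Int) by ring]
  have e1 : PySem.Int.floordiv (k : Int) 3 = ((k / 3 : Nat) : Int) := by
    exact_mod_cast PySem.Int.floordiv_natCast k 3
  have e2 : PySem.Int.floordiv (2 * (k : Int)) 3 = ((2 * k / 3 : Nat) : Int) := by
    rw [show (2 * (k : Int)) = ((2 * k : Nat) : Int) by push_cast; ring]
    exact_mod_cast PySem.Int.floordiv_natCast (2 * k) 3
  rw [e1, e2]
  simp only [chunkVals, PySem.List.pyGetD_natCast]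

theorem findMedianA_eq (arr : List Int) (a : Int) (k : Nat) :
    findMedianA arr a (a + ↑k)
      = ((sortCountB (chunkVals arr a (a + ↑k))).1.getD (k / 2) 0,
         (sortCountB (chunkVals arr a (a + ↑k))).2) := by
  rw [findMedianA]
  simp only [PySem.List.foldl_append_singleton_eq_map, List.nil_append]
  rw [sortA_eq, show a + (k : Int) - a = (k : Int) by ring]
  have e1 : PySem.Int.floordiv (k : Int) 2 = ((k / 2 : Nat) : Int) := by
    exact_mod_cast PySem.Int.floordiv_natCast k 2
  rw [e1]
  simp only [chunkVals, PySem.List.pyGetD_natCast]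

-- unfolding groupMedB / groupMed2B on a full first chunk and on a short list
theorem groupMedB_chunk (xs ys : List Int) (h : xs.length = 5) :
    groupMedB (xs ++ ys)
      = ((sortCountB xs).1.getD 2 0 :: (groupMedB ys).1,
         (sortCountB xs).2 + (groupMedB ys).2) := by
  obtain ⟨x, t, rfl⟩ := List.exists_cons_of_ne_nil (by intro hc; rw [hc] at h; simp at h : xs ≠ [])
  rw [List.cons_append, groupMedB, ← List.cons_append, List.take_left' (by simpa using h), List.drop_left' (by simpa using h)]
  rw [show (sortCountB (x :: t)).1.length = 5 by rw [sortCountB_length]; simpa using h]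

theorem groupMed2B_chunk (xs ys : List Int) (h : xs.length = 5) :
    groupMed2B (xs ++ ys)
      = ((sortCountB xs).1.getD 1 0 :: (groupMed2B ys).1,
         (sortCountB xs).1.getD 3 0 :: (groupMed2B ys).2.1,
         (sortCountB xs).2 + (groupMed2B ys).2.2) := by
  obtain ⟨x, t, rfl⟩ := List.exists_cons_of_ne_nil (by intro hc; rw [hc] at h; simp at h : xs ≠ [])
  rw [List.cons_append, groupMed2B, ← List.cons_append, List.take_left' (by simpa using h), List.drop_left' (by simpa using h)]
  rw [show (sortCountB (x :: t)).1.length = 5 by rw [sortCountB_length]; simpa using h]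

theorem groupMedB_small (xs : List Int) (h0 : xs ≠ []) (h5 : xs.length ≤ 5) :
    groupMedB xs = ([(sortCountB xs).1.getD (xs.length / 2) 0], (sortCountB xs).2) := by
  obtain ⟨x, t, rfl⟩ := List.exists_cons_of_ne_nil h0
  rw [groupMedB, List.take_of_length_le h5, List.drop_eq_nil_of_le h5, groupMedB]
  simp [sortCountB_length]

theorem groupMed2B_small (xs : List Int) (h0 : xs ≠ []) (h5 : xs.length ≤ 5) :
    groupMed2B xs = ([(sortCountB xs).1.getD (xs.length / 3) 0],
        [(sortCountB xs).1.getD (2 * xs.length / 3) 0], (sortCountB xs).2) := by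
  obtain ⟨x, t, rfl⟩ := List.exists_cons_of_ne_nil h0
  rw [groupMed2B, List.take_of_length_le h5, List.drop_eq_nil_of_le h5, groupMed2B]
  simp [sortCountB_length]

-- collapsing A's accumulator folds into maps and sums
theorem fold3_collapse (ks : List Int) (f : Int → Int × Int) (M : List Int) (C I : Int) :
    ks.foldl (fun (acc : List Int × Int × Int) i =>
        (acc.1 ++ [(f i).1], acc.2.1 + (f i).2, acc.2.2 + 1)) (M, C, I)
      = (M ++ ks.map (fun i => (f i).1),
         C + (ks.map (fun i => (f i).2)).sum, I + ks.length) := by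
  induction ks generalizing M C I with
  | nil => simp
  | cons k t ih =>
    simp only [List.foldl_cons, List.map_cons, List.sum_cons, List.length_cons, ih]
    refine Prod.ext (by simp) (Prod.ext (by simp; ring) ?_)
    simp
    ring

theorem fold4_collapse (ks : List Int) (f : Int → Int × Int × Int) (M1 M2 : List Int) (C I : Int) :
    ks.foldl (fun (acc : List Int × List Int × Int × Int) i =>
        (acc.1 ++ [(f i).1], acc.2.1 ++ [(f i).2.1], acc.2.2.1 + (f i).2.2, acc.2.2.2 + 1)) (M1, M2, C, I)
      = (M1 ++ ks.map (fun i => (f i).1), M2 ++ ks.map (fun i => (f i).2.1),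
         C + (ks.map (fun i => (f i).2.2)).sum, I + ks.length) := by
  induction ks generalizing M1 M2 C I with
  | nil => simp
  | cons k t ih =>
    simp only [List.foldl_cons, List.map_cons, List.sum_cons, List.length_cons, ih]
    refine Prod.ext (by simp) (Prod.ext (by simp) (Prod.ext (by simp; ring) ?_))
    simp
    ring

-- B's recursive chunking computes exactly A's per-group findMedian(s) sequence
theorem chunk1 (arr : List Int) : ∀ (N : Nat) (l : Int),
    groupMedB (chunkVals arr l (l + ↑N))
      = ((List.range (N / 5)).map (fun (k : Nat) => (findMedianA arr (l + 5 * (k : Int)) (l + 5 * (k : Int) + 5)).1)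
           ++ (if N % 5 = 0 then [] else
                [(findMedianA arr (l + 5 * ↑(N / 5)) (l + 5 * ↑(N / 5) + ↑(N % 5))).1]),
         ((List.range (N / 5)).map (fun (k : Nat) => (findMedianA arr (l + 5 * (k : Int)) (l + 5 * (k : Int) + 5)).2)).sum
           + (if N % 5 = 0 then 0 else
                (findMedianA arr (l + 5 * ↑(N / 5)) (l + 5 * ↑(N / 5) + ↑(N % 5))).2)) := by
  intro N
  induction N using Nat.strong_induction_on with
  | _ N ih =>
    intro l
    rcases Nat.lt_or_ge N 5 with h5 | h5
    · rcases Nat.eq_zero_or_pos N with h0 | h0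
      · subst h0
        rw [show chunkVals arr l (l + ((0:Nat):Int)) = [] by
          simp [chunkVals, PySem.List.pyRange_one_eq_nil]]
        rw [groupMedB]
        simp
      · have hlen : (chunkVals arr l (l + ↑N)).length = N := chunkVals_length arr l N
        have hne : chunkVals arr l (l + ↑N) ≠ [] := by
          intro hc; rw [hc] at hlen; simp at hlen; omega
        rw [groupMedB_small _ hne (by omega), hlen]
        rw [Nat.div_eq_of_lt h5, Nat.mod_eq_of_lt h5]
        rw [if_neg (by omega), if_neg (by omega)]
        simp only [List.range_zero, List.map_nil, List.nil_append, List.sum_nil,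
          Nat.cast_zero, mul_zero, add_zero, zero_add]
        rw [findMedianA_eq arr l N]
    · obtain ⟨M, rfl⟩ : ∃ M, N = M + 5 := ⟨N - 5, by omega⟩
      have hmid : l + ((M + 5 : Nat) : Int) = (l + 5) + ↑M := by push_cast; ring
      have hsplit : chunkVals arr l (l + ↑(M + 5))
          = chunkVals arr l (l + 5) ++ chunkVals arr (l + 5) ((l + 5) + ↑M) := by
        unfold chunkVals
        rw [hmid, ← List.map_append,
          ← PySem.List.pyRange_one_append l (l + 5) ((l + 5) + ↑M) (by omega)
            (by have : (0:Int) ≤ ↑M := by positivity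
                omega)]
      have hlen5 : (chunkVals arr l (l + 5)).length = 5 := by
        simp [chunkVals, PySem.List.length_pyRange_one]
      rw [hsplit, groupMedB_chunk _ _ hlen5, ih M (by omega) (l + 5)]
      rw [show (M + 5) / 5 = M / 5 + 1 by omega, show (M + 5) % 5 = M % 5 by omega,
        List.range_succ_eq_map]
      simp only [List.map_cons, List.map_map, Nat.cast_zero, mul_zero,
        add_zero, List.sum_cons, List.cons_append]
      have hf5 : findMedianA arr l (l + 5)
          = ((sortCountB (chunkVals arr l (l + 5))).1.getD 2 0,
             (sortCountB (chunkVals arr l (l + 5))).2) := by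
        have h := findMedianA_eq arr l 5
        norm_num at h
        exact h
      have harg : ∀ (k : Nat), l + 5 * ((k + 1 : Nat) : Int) = l + 5 + 5 * (k : Int) := by
        intro k; push_cast; ring
      have hm1 : List.map ((fun (k : Nat) => (findMedianA arr (l + 5 * (k : Int)) (l + 5 * (k : Int) + 5)).1) ∘ Nat.succ) (List.range (M / 5))
          = List.map (fun (k : Nat) => (findMedianA arr (l + 5 + 5 * (k : Int)) (l + 5 + 5 * (k : Int) + 5)).1) (List.range (M / 5)) := by
        apply List.map_congr_left; intro k _
        simp only [Function.comp_apply, Nat.succ_eq_add_one, harg]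
      have hm2 : List.map ((fun (k : Nat) => (findMedianA arr (l + 5 * (k : Int)) (l + 5 * (k : Int) + 5)).2) ∘ Nat.succ) (List.range (M / 5))
          = List.map (fun (k : Nat) => (findMedianA arr (l + 5 + 5 * (k : Int)) (l + 5 + 5 * (k : Int) + 5)).2) (List.range (M / 5)) := by
        apply List.map_congr_left; intro k _
        simp only [Function.comp_apply, Nat.succ_eq_add_one, harg]
      have htail : l + 5 * ((M / 5 + 1 : Nat) : Int) = l + 5 + 5 * ((M / 5 : Nat) : Int) := by
        push_cast; ring
      rw [hf5, hm1, hm2, htail]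
      simp [add_assoc]

theorem chunk2 (arr : List Int) : ∀ (N : Nat) (l : Int),
    groupMed2B (chunkVals arr l (l + ↑N))
      = ((List.range (N / 5)).map (fun (k : Nat) => (findMediansA arr (l + 5 * (k : Int)) (l + 5 * (k : Int) + 5)).1)
           ++ (if N % 5 = 0 then [] else
                [(findMediansA arr (l + 5 * ↑(N / 5)) (l + 5 * ↑(N / 5) + ↑(N % 5))).1]),
         (List.range (N / 5)).map (fun (k : Nat) => (findMediansA arr (l + 5 * (k : Int)) (l + 5 * (k : Int) + 5)).2.1)
           ++ (if N % 5 = 0 then [] else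
                [(findMediansA arr (l + 5 * ↑(N / 5)) (l + 5 * ↑(N / 5) + ↑(N % 5))).2.1]),
         ((List.range (N / 5)).map (fun (k : Nat) => (findMediansA arr (l + 5 * (k : Int)) (l + 5 * (k : Int) + 5)).2.2)).sum
           + (if N % 5 = 0 then 0 else
                (findMediansA arr (l + 5 * ↑(N / 5)) (l + 5 * ↑(N / 5) + ↑(N % 5))).2.2)) := by
  intro N
  induction N using Nat.strong_induction_on with
  | _ N ih =>
    intro l
    rcases Nat.lt_or_ge N 5 with h5 | h5
    · rcases Nat.eq_zero_or_pos N with h0 | h0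
      · subst h0
        rw [show chunkVals arr l (l + ((0:Nat):Int)) = [] by
          simp [chunkVals, PySem.List.pyRange_one_eq_nil]]
        rw [groupMed2B]
        simp
      · have hlen : (chunkVals arr l (l + ↑N)).length = N := chunkVals_length arr l N
        have hne : chunkVals arr l (l + ↑N) ≠ [] := by
          intro hc; rw [hc] at hlen; simp at hlen; omega
        rw [groupMed2B_small _ hne (by omega), hlen]
        rw [Nat.div_eq_of_lt h5, Nat.mod_eq_of_lt h5]
        rw [if_neg (by omega), if_neg (by omega), if_neg (by omega)]
        simp only [List.range_zero, List.map_nil, List.nil_append, List.sum_nil,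
          Nat.cast_zero, mul_zero, add_zero, zero_add]
        rw [findMediansA_eq arr l N]
    · obtain ⟨M, rfl⟩ : ∃ M, N = M + 5 := ⟨N - 5, by omega⟩
      have hmid : l + ((M + 5 : Nat) : Int) = (l + 5) + ↑M := by push_cast; ring
      have hsplit : chunkVals arr l (l + ↑(M + 5))
          = chunkVals arr l (l + 5) ++ chunkVals arr (l + 5) ((l + 5) + ↑M) := by
        unfold chunkVals
        rw [hmid, ← List.map_append,
          ← PySem.List.pyRange_one_append l (l + 5) ((l + 5) + ↑M) (by omega)
            (by have : (0:Int) ≤ ↑M := by positivity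
                omega)]
      have hlen5 : (chunkVals arr l (l + 5)).length = 5 := by
        simp [chunkVals, PySem.List.length_pyRange_one]
      rw [hsplit, groupMed2B_chunk _ _ hlen5, ih M (by omega) (l + 5)]
      rw [show (M + 5) / 5 = M / 5 + 1 by omega, show (M + 5) % 5 = M % 5 by omega,
        List.range_succ_eq_map]
      simp only [List.map_cons, List.map_map, Nat.cast_zero, mul_zero,
        add_zero, List.sum_cons, List.cons_append]
      have hf5 : findMediansA arr l (l + 5)
          = ((sortCountB (chunkVals arr l (l + 5))).1.getD 1 0,
             (sortCountB (chunkVals arr l (l + 5))).1.getD 3 0,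
             (sortCountB (chunkVals arr l (l + 5))).2) := by
        have h := findMediansA_eq arr l 5
        norm_num at h
        exact h
      have harg : ∀ (k : Nat), l + 5 * ((k + 1 : Nat) : Int) = l + 5 + 5 * (k : Int) := by
        intro k; push_cast; ring
      have hm1 : List.map ((fun (k : Nat) => (findMediansA arr (l + 5 * (k : Int)) (l + 5 * (k : Int) + 5)).1) ∘ Nat.succ) (List.range (M / 5))
          = List.map (fun (k : Nat) => (findMediansA arr (l + 5 + 5 * (k : Int)) (l + 5 + 5 * (k : Int) + 5)).1) (List.range (M / 5)) := by
        apply List.map_congr_left; intro k _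
        simp only [Function.comp_apply, Nat.succ_eq_add_one, harg]
      have hm2 : List.map ((fun (k : Nat) => (findMediansA arr (l + 5 * (k : Int)) (l + 5 * (k : Int) + 5)).2.1) ∘ Nat.succ) (List.range (M / 5))
          = List.map (fun (k : Nat) => (findMediansA arr (l + 5 + 5 * (k : Int)) (l + 5 + 5 * (k : Int) + 5)).2.1) (List.range (M / 5)) := by
        apply List.map_congr_left; intro k _
        simp only [Function.comp_apply, Nat.succ_eq_add_one, harg]
      have hm3 : List.map ((fun (k : Nat) => (findMediansA arr (l + 5 * (k : Int)) (l + 5 * (k : Int) + 5)).2.2) ∘ Nat.succ) (List.range (M / 5))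
          = List.map (fun (k : Nat) => (findMediansA arr (l + 5 + 5 * (k : Int)) (l + 5 + 5 * (k : Int) + 5)).2.2) (List.range (M / 5)) := by
        apply List.map_congr_left; intro k _
        simp only [Function.comp_apply, Nat.succ_eq_add_one, harg]
      have htail : l + 5 * ((M / 5 + 1 : Nat) : Int) = l + 5 + 5 * ((M / 5 : Nat) : Int) := by
        push_cast; ring
      rw [hf5, hm1, hm2, hm3, htail]
      simp [add_assoc]

-- the reduction loop is affine in its accumulated count
theorem medRed_shift : ∀ (xs : List Int) (c : Int),
    medianReduceLoopB xs c = ((medianReduceLoopB xs 0).1, c + (medianReduceLoopB xs 0).2) := by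
  have aux : ∀ (n : Nat) (xs : List Int), xs.length = n → ∀ (c : Int),
      medianReduceLoopB xs c = ((medianReduceLoopB xs 0).1, c + (medianReduceLoopB xs 0).2) := by
    intro n
    induction n using Nat.strong_induction_on with
    | _ n ih =>
      intro xs hxs c
      by_cases h1 : 1 < xs.length
      · conv_rhs => rw [medianReduceLoopB]
        conv_lhs => rw [medianReduceLoopB]
        rw [dif_pos h1, dif_pos h1]
        have hlt : (groupMedB xs).1.length < n := by rw [groupMedB_length]; omega
        rw [ih _ hlt _ rfl (0 + (groupMedB xs).2), ih _ hlt _ rfl (c + (groupMedB xs).2)]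
        refine Prod.ext rfl ?_
        simp
        ring
      · conv_rhs => rw [medianReduceLoopB]
        conv_lhs => rw [medianReduceLoopB]
        rw [dif_neg h1, dif_neg h1]
        simp
  intro xs c
  exact aux xs.length xs rfl c

theorem mapRange {α : Type} (q : Nat) (f : Int → α) :
    (PySem.List.pyRange 0 (q : Int) 1).map f = (List.range q).map (fun (k : Nat) => f (k : Int)) := by
  rw [PySem.List.pyRange_zero_natCast, List.map_map]
  rfl

-- the branch-and-recurse tail of A's `select`, once its grouping phase has
-- been rewritten to groupMedB, equals B's loop
theorem selCore (m med : List Int) (C : Int)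
    (hg : groupMedB m = (med, C)) (hm2 : 2 ≤ m.length)
    (hlt : med.length < m.length) (h1le : 1 ≤ med.length)
    (hrec : 2 ≤ med.length → selectA med 0 ((med.length : Int) - 1) = medianReduceLoopB med 0) :
    (if ((med.length : Int)) = 1 then
        (PySem.List.pyGetD med (((med.length : Int)) - 1) 0, C)
      else if _h : 0 ≤ ((med.length : Int)) - 1 ∧ (((med.length : Int)) - 1).toNat < ((m.length : Int) - 1).toNat then
        ((selectA med 0 (((med.length : Int)) - 1)).1, C + (selectA med 0 (((med.length : Int)) - 1)).2)
      else (0, C))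
      = medianReduceLoopB m 0 := by
  conv_rhs => rw [medianReduceLoopB]
  rw [dif_pos (by omega : 1 < m.length), hg]
  dsimp only
  by_cases hone : med.length = 1
  · rw [if_pos (by simp [hone] : ((med.length : Int)) = 1)]
    rw [medianReduceLoopB, dif_neg (by omega)]
    rw [hone]
    norm_num [PySem.List.pyGetD_zero]
  · rw [if_neg (by omega), dif_pos ⟨by omega, by omega⟩]
    rw [hrec (by omega), medRed_shift med (0 + C)]
    refine Prod.ext rfl ?_
    simp

-- A's recursive `select` is B's reduction loop
theorem selRed : ∀ (n : Nat) (m : List Int), m.length = n → 2 ≤ n →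
    selectA m 0 ((m.length : Int) - 1) = medianReduceLoopB m 0 := by
  intro n
  induction n using Nat.strong_induction_on with
  | _ n ih =>
    intro m hm h2
    rw [selectA]
    rw [show ((m.length : Int) - 1 - 0 + 1) = ((m.length : Nat) : Int) by ring]
    rw [show PySem.Int.floordiv ((m.length : Nat) : Int) 5 = ((m.length / 5 : Nat) : Int) from
      PySem.Int.floordiv_natCast m.length 5]
    rw [show PySem.Int.mod ((m.length : Nat) : Int) 5 = ((m.length % 5 : Nat) : Int) from
      PySem.Int.mod_natCast m.length 5]
    rw [fold3_collapse, mapRange, mapRange]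
    dsimp only
    simp only [List.nil_append, zero_add, PySem.List.length_pyRange_one, sub_zero,
      Int.toNat_natCast]
    have hCV : chunkVals m 0 (0 + (m.length : Int)) = m := by
      rw [chunkVals, zero_add]
      exact PySem.List.map_pyGetD_pyRange_zero' m 0
    have hG := chunk1 m m.length 0
    rw [hCV] at hG
    simp only [zero_add] at hG ⊢
    by_cases hmod : m.length % 5 = 0
    · rw [if_neg (by omega : ¬ ((m.length / 5 : Nat) : Int) * 5 < ((m.length : Nat) : Int))]
      rw [if_pos hmod, if_pos hmod] at hG
      simp only [List.append_nil, add_zero] at hG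
      have hmed : (groupMedB m).1
          = (List.range (m.length / 5)).map
              (fun (k : Nat) => (findMedianA m (5 * (k : Int)) (5 * (k : Int) + 5)).1) := by
        rw [hG]
      have hC : (groupMedB m).2
          = ((List.range (m.length / 5)).map
              (fun (k : Nat) => (findMedianA m (5 * (k : Int)) (5 * (k : Int) + 5)).2)).sum := by
        rw [hG]
      have hql : ((m.length / 5 : Nat) : Int) = ((groupMedB m).1.length : Int) := by
        rw [groupMedB_length]
        have : (m.length + 4) / 5 = m.length / 5 := by omega
        rw [this]
      rw [← hmed, ← hC, hql]
      have hlen : (groupMedB m).1.length = m.length / 5 := by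
        rw [groupMedB_length]; omega
      exact selCore m (groupMedB m).1 (groupMedB m).2 rfl (by omega) (by omega)
        (by omega) (fun hge => ih (groupMedB m).1.length (by omega) _ rfl hge)
    · rw [if_pos (by omega : ((m.length / 5 : Nat) : Int) * 5 < ((m.length : Nat) : Int))]
      dsimp only
      rw [if_neg hmod, if_neg hmod] at hG
      have hql : ((m.length / 5 : Nat) : Int) + 1 = ((groupMedB m).1.length : Int) := by
        rw [groupMedB_length]
        have : (m.length + 4) / 5 = m.length / 5 + 1 := by omega
        rw [this]
        push_cast
        ring
      have hmed : (groupMedB m).1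
          = (List.range (m.length / 5)).map
              (fun (k : Nat) => (findMedianA m (5 * (k : Int)) (5 * (k : Int) + 5)).1)
            ++ [(findMedianA m (5 * ((m.length / 5 : Nat) : Int))
                  (5 * ((m.length / 5 : Nat) : Int) + ((m.length % 5 : Nat) : Int))).1] := by
        rw [hG]
      have hC : (groupMedB m).2
          = ((List.range (m.length / 5)).map
              (fun (k : Nat) => (findMedianA m (5 * (k : Int)) (5 * (k : Int) + 5)).2)).sum
            + (findMedianA m (5 * ((m.length / 5 : Nat) : Int))
                (5 * ((m.length / 5 : Nat) : Int) + ((m.length % 5 : Nat) : Int))).2 := by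
        rw [hG]
      rw [hql, ← hmed, ← hC]
      have hlen : (groupMedB m).1.length = m.length / 5 + 1 := by
        rw [groupMedB_length]; omega
      exact selCore m (groupMedB m).1 (groupMedB m).2 rfl (by omega) (by omega)
        (by omega) (fun hge => ih (groupMedB m).1.length (by omega) _ rfl hge)

-- ===== VERDICT (by name: the statement is the Claim_ definition above) =====
theorem dualSelect_spec : Claim_equal_dualSelect := by
  unfold Claim_equal_dualSelect
  intro arr l r _hdom hpre
  unfold Spec_dualSelect
  unfold Pre_dualSelect at hpre
  obtain ⟨hl, hlr, hr⟩ := hpre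
  obtain ⟨N, hN⟩ : ∃ N : Nat, (r - l + 1 : Int) = ↑N := ⟨(r - l + 1).toNat, by omega⟩
  have hNpos : 1 ≤ N := by omega
  rw [dualSelect, dualSelect_alt, hN]
  rw [show (r + 1 : Int) = l + ↑N by omega]
  rw [show PySem.Int.floordiv ((N : Nat) : Int) 5 = ((N / 5 : Nat) : Int) from
    PySem.Int.floordiv_natCast N 5]
  rw [show PySem.Int.mod ((N : Nat) : Int) 5 = ((N % 5 : Nat) : Int) from
    PySem.Int.mod_natCast N 5]
  rw [fold4_collapse, mapRange, mapRange, mapRange]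
  dsimp only
  simp only [List.nil_append, zero_add, PySem.List.length_pyRange_one, sub_zero,
    Int.toNat_natCast]
  have hG := chunk2 arr N l
  rw [show chunkVals arr l (l + ↑N)
      = (PySem.List.pyRange l (l + ↑N) 1).map (fun i => PySem.List.pyGetD arr i 0) from rfl] at hG
  generalize hgen : (PySem.List.pyRange l (l + ↑N) 1).map (fun i => PySem.List.pyGetD arr i 0) = seg at hG ⊢
  by_cases hmod : N % 5 = 0
  · rw [if_neg (by omega : ¬ ((N / 5 : Nat) : Int) * 5 < ((N : Nat) : Int))]
    rw [if_pos hmod, if_pos hmod, if_pos hmod] at hG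
    simp only [List.append_nil, add_zero] at hG
    have h1 : (groupMed2B seg).1
        = (List.range (N / 5)).map
            (fun (k : Nat) => (findMediansA arr (l + 5 * (k : Int)) (l + 5 * (k : Int) + 5)).1) := by
      rw [hG]
    have h2 : (groupMed2B seg).2.1
        = (List.range (N / 5)).map
            (fun (k : Nat) => (findMediansA arr (l + 5 * (k : Int)) (l + 5 * (k : Int) + 5)).2.1) := by
      rw [hG]
    have h3 : (groupMed2B seg).2.2
        = ((List.range (N / 5)).map
            (fun (k : Nat) => (findMediansA arr (l + 5 * (k : Int)) (l + 5 * (k : Int) + 5)).2.2)).sum := by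
      rw [hG]
    rw [← h1, ← h2, ← h3]
    have hL1 : (groupMed2B seg).1.length = N / 5 := by rw [h1]; simp
    have hL2 : (groupMed2B seg).2.1.length = N / 5 := by rw [h2]; simp
    rw [show ((N / 5 : Nat) : Int) = ((groupMed2B seg).1.length : Int) by rw [hL1]]
    by_cases hone : (groupMed2B seg).1.length = 1
    · rw [if_pos (by simp [hone]), if_pos hone]
      simp [PySem.List.pyGetD_zero]
    · rw [if_neg (by simpa using hone), if_neg hone]
      dsimp only [medianReduceB]
      have hs1 : selectA (groupMed2B seg).1 0 (((groupMed2B seg).1.length : Int) - 1)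
          = medianReduceLoopB (groupMed2B seg).1 0 := selRed _ _ rfl (by omega)
      have hs2 : selectA (groupMed2B seg).2.1 0 (((groupMed2B seg).1.length : Int) - 1)
          = medianReduceLoopB (groupMed2B seg).2.1 0 := by
        rw [show ((groupMed2B seg).1.length : Int) = ((groupMed2B seg).2.1.length : Int) by
          rw [hL1, hL2]]
        exact selRed _ _ rfl (by omega)
      rw [hs1, hs2]
      refine Prod.ext rfl (Prod.ext rfl ?_)
      simp
      ring
  · rw [if_pos (by omega : ((N / 5 : Nat) : Int) * 5 < ((N : Nat) : Int))]
    dsimp only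
    rw [if_neg hmod, if_neg hmod, if_neg hmod] at hG
    have h1 : (groupMed2B seg).1
        = (List.range (N / 5)).map
            (fun (k : Nat) => (findMediansA arr (l + 5 * (k : Int)) (l + 5 * (k : Int) + 5)).1)
          ++ [(findMediansA arr (l + 5 * ((N / 5 : Nat) : Int))
                (l + 5 * ((N / 5 : Nat) : Int) + ((N % 5 : Nat) : Int))).1] := by
      rw [hG]
    have h2 : (groupMed2B seg).2.1
        = (List.range (N / 5)).map
            (fun (k : Nat) => (findMediansA arr (l + 5 * (k : Int)) (l + 5 * (k : Int) + 5)).2.1)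
          ++ [(findMediansA arr (l + 5 * ((N / 5 : Nat) : Int))
                (l + 5 * ((N / 5 : Nat) : Int) + ((N % 5 : Nat) : Int))).2.1] := by
      rw [hG]
    have h3 : (groupMed2B seg).2.2
        = ((List.range (N / 5)).map
            (fun (k : Nat) => (findMediansA arr (l + 5 * (k : Int)) (l + 5 * (k : Int) + 5)).2.2)).sum
          + (findMediansA arr (l + 5 * ((N / 5 : Nat) : Int))
              (l + 5 * ((N / 5 : Nat) : Int) + ((N % 5 : Nat) : Int))).2.2 := by
      rw [hG]
    rw [← h1, ← h2, ← h3]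
    have hL1 : (groupMed2B seg).1.length = N / 5 + 1 := by rw [h1]; simp
    have hL2 : (groupMed2B seg).2.1.length = N / 5 + 1 := by rw [h2]; simp
    rw [show ((N / 5 : Nat) : Int) + 1 = ((groupMed2B seg).1.length : Int) by
      rw [hL1]; push_cast; ring]
    by_cases hone : (groupMed2B seg).1.length = 1
    · rw [if_pos (by simp [hone]), if_pos hone]
      simp [PySem.List.pyGetD_zero]
    · rw [if_neg (by simpa using hone), if_neg hone]
      dsimp only [medianReduceB]
      have hs1 : selectA (groupMed2B seg).1 0 (((groupMed2B seg).1.length : Int) - 1)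
          = medianReduceLoopB (groupMed2B seg).1 0 := selRed _ _ rfl (by omega)
      have hs2 : selectA (groupMed2B seg).2.1 0 (((groupMed2B seg).1.length : Int) - 1)
          = medianReduceLoopB (groupMed2B seg).2.1 0 := by
        rw [show ((groupMed2B seg).1.length : Int) = ((groupMed2B seg).2.1.length : Int) by
          rw [hL1, hL2]]
        exact selRed _ _ rfl (by omega)
      rw [hs1, hs2]
      refine Prod.ext rfl (Prod.ext rfl ?_)
      simp
      ring
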